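-- pv_equiv track=rewrite | github.com/simonelusetti/RatCon | utils/analyze.py | build_vocab_and_sentences
-- ===== SOURCE A (Python) =====
-- from collections import defaultdict
-- from typing import Tuple, List, Dict, Iterable
--
-- def build_vocab_and_sentences(
--     sent_stream: Iterable[Tuple[List[str], List[int]]],
--     max_vocab: int,
--     min_word_count: int,
-- ) -> tuple[list[tuple[list[str], list[int]]], dict[str, int], set[str]]:
--     sents = []
--     counts = defaultdict(int)
--
--     for words, sels in sent_stream:
--         sents.append((words, sels))
--         for w in words:
--             counts[w] += 1
--
--     vocab = [
--         w for w, c in sorted(counts.items(), key=lambda x: x[1], reverse=True)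
--         if c >= min_word_count
--     ][:max_vocab]
--
--     return sents, counts, set(vocab)
-- ===== SOURCE B (Python) =====
-- from collections import Counter, defaultdict
--
-- def build_vocab_and_sentences(sent_stream, max_vocab, min_word_count):
--     sents = list(sent_stream)
--     counts = Counter(w for words, _ in sents for w in words)
--
--     # bucket the words by frequency (first-appearance order within a bucket)
--     buckets = defaultdict(list)
--     for w, c in counts.items():
--         buckets[c].append(w)
--
--     # concatenate buckets by descending frequency, building back-to-front
--     maxc = max(counts.values(), default=0)
--     lo = max(min_word_count, 1)
--     ordered = []
--     for c in range(lo, maxc + 1):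
--         ordered = buckets.get(c, []) + ordered
--
--     return sents, counts, set(ordered[:max_vocab])
-- ===== Notes on version B (the rewrite author's own statement) =====
-- stated objective: alternative
-- what changed: The vocabulary's stable descending-count ordering is produced by bucketing words by frequency and concatenating buckets from the highest count down (built back-to-front over an ascending range) instead of a comparison sort of counts.items(), and the counting pass is a Counter over the flattened word stream instead of an interleaved defaultdict loop.
import Mathlib
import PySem

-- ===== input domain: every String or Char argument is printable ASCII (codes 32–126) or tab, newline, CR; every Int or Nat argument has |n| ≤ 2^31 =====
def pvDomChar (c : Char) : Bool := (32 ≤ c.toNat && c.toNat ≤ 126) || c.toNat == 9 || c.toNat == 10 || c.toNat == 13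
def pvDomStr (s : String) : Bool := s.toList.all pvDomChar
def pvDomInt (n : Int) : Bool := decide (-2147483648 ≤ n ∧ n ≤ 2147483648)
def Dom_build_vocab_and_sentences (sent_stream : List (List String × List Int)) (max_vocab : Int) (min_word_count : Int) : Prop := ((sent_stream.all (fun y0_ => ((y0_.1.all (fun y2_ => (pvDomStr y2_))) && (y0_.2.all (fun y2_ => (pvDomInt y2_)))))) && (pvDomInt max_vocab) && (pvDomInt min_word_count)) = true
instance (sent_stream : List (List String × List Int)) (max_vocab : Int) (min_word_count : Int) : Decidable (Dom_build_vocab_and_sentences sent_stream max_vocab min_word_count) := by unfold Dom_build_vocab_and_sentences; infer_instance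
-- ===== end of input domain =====

-- B replaces A's O(V log V) comparison sort of the vocabulary by frequency buckets concatenated
-- in descending-count order (objective: alternative; return-value equivalence proved below).

-- ===== PORT A =====
def build_vocab_and_sentences (sent_stream : List (List String × List Int)) (max_vocab : Int) (min_word_count : Int) : (List (List String × List Int)) × (List (String × Int)) × List String :=
  -- for words, sels in sent_stream: sents.append(...); for w in words: counts[w] += 1
  let st := sent_stream.foldl
    (fun (acc : (List (List String × List Int)) × PySem.Dict String Int) p =>
      (acc.1 ++ [p], p.1.foldl (fun d w => d.modify w 0 (· + 1)) acc.2))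
    ([], PySem.Dict.empty)
  let sents := st.1
  let counts := st.2
  -- vocab = [w for w, c in sorted(counts.items(), key=..c.., reverse=True) if c >= min_word_count][:max_vocab]
  let vocab := PySem.List.slice
    (((PySem.List.sorted counts.items (fun x => x.2) true).filter
        (fun x => decide (min_word_count ≤ x.2))).map (fun x => x.1))
    none (some max_vocab)
  (sents, counts.items, PySem.Set.ofList vocab)

-- ===== PORT B =====
def build_vocab_and_sentences_alt (sent_stream : List (List String × List Int)) (max_vocab : Int) (min_word_count : Int) : (List (List String × List Int)) × (List (String × Int)) × List String :=
  -- sents = list(sent_stream); counts = Counter(w for words, _ in sents for w in words)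
  let sents := sent_stream
  let counts := PySem.Dict.counter (sents.flatMap (fun p => p.1))
  -- for w, c in counts.items(): buckets[c].append(w)
  let buckets := counts.items.foldl
    (fun (d : PySem.Dict Int (List String)) p => d.modify p.2 [] (· ++ [p.1]))
    PySem.Dict.empty
  -- maxc = max(counts.values(), default=0); lo = max(min_word_count, 1)
  let maxc := (PySem.List.max? counts.values (fun v => v)).getD 0
  let lo := max min_word_count 1
  -- for c in range(lo, maxc + 1): ordered = buckets.get(c, []) + ordered
  let ordered := (PySem.List.pyRange lo (maxc + 1) 1).foldl
    (fun acc c => buckets.getD c [] ++ acc) []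
  (sents, counts.items, PySem.Set.ofList (PySem.List.slice ordered none (some max_vocab)))

-- ===== PRECONDITION & SPEC =====
def Spec_build_vocab_and_sentences (sent_stream : List (List String × List Int)) (max_vocab : Int) (min_word_count : Int) (out : (List (List String × List Int)) × (List (String × Int)) × List String) : Prop := out = build_vocab_and_sentences_alt sent_stream max_vocab min_word_count
instance (sent_stream : List (List String × List Int)) (max_vocab : Int) (min_word_count : Int) (out : (List (List String × List Int)) × (List (String × Int)) × List String) : Decidable (Spec_build_vocab_and_sentences sent_stream max_vocab min_word_count out) := by unfold Spec_build_vocab_and_sentences; infer_instance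

-- ===== CLAIM (what is proved, stated in full; the proofs are below) =====
def Claim_equal_build_vocab_and_sentences : Prop := ∀ (sent_stream : List (List String × List Int)) (max_vocab : Int) (min_word_count : Int), Dom_build_vocab_and_sentences sent_stream max_vocab min_word_count → Spec_build_vocab_and_sentences sent_stream max_vocab min_word_count (build_vocab_and_sentences sent_stream max_vocab min_word_count)

-- ===== LEMMAS AND PROOFS =====

-- A's interleaved counting loop is the counting fold over the concatenated word lists.
theorem pv_nested_count (ss : List (List String × List Int)) (d : PySem.Dict String Int) :
    ss.foldl (fun d p => p.1.foldl (fun d w => d.modify w 0 (· + 1)) d) d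
      = (ss.flatMap (fun p => p.1)).foldl (fun d w => d.modify w 0 (· + 1)) d := by
  induction ss generalizing d with
  | nil => rfl
  | cons p t ih => simp [List.flatMap_cons, List.foldl_append, ih]

-- insertBy passes over a block none of whose elements trigger `before`.
theorem pv_insertBy_append {α : Type} (before : α → α → Bool) (x : α) (ys zs : List α)
    (h : ∀ y ∈ ys, before x y = false) :
    PySem.List.insertBy before x (ys ++ zs) = ys ++ PySem.List.insertBy before x zs := by
  induction ys with
  | nil => rfl
  | cons y t ih =>
    have hy : before x y = false := h y List.mem_cons_self
    simp only [List.cons_append]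
    rw [show PySem.List.insertBy before x (y :: (t ++ zs))
          = y :: PySem.List.insertBy before x (t ++ zs) from by
        simp [PySem.List.insertBy, hy]]
    rw [ih (fun a ha => h a (List.mem_cons_of_mem _ ha))]

-- insertBy puts x in front of a list whose every element triggers `before`.
theorem pv_insertBy_front {α : Type} (before : α → α → Bool) (x : α) (zs : List α)
    (h : ∀ z ∈ zs, before x z = true) :
    PySem.List.insertBy before x zs = x :: zs := by
  cases zs with
  | nil => rfl
  | cons z t => simp [PySem.List.insertBy, h z List.mem_cons_self]

-- Inserting p into buckets grouped by strictly decreasing snd appends it to its own bucket.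
theorem pv_insertBy_groups (cs : List Int) (g : Int → List (String × Int)) (p : String × Int)
    (hg : ∀ c ∈ cs, ∀ q ∈ g c, q.2 = c)
    (hs : cs.Pairwise (fun a b => b < a)) (hp : p.2 ∈ cs) :
    PySem.List.insertBy (fun a b => decide (b.2 < a.2)) p (cs.flatMap g)
      = cs.flatMap (fun c => if c = p.2 then g c ++ [p] else g c) := by
  induction cs with
  | nil => cases hp
  | cons c cs' ih =>
    rcases List.pairwise_cons.mp hs with ⟨hcl, hs'⟩
    by_cases hc : c = p.2
    · have hpass : ∀ y ∈ g c, (fun (a b : String × Int) => decide (b.2 < a.2)) p y = false := by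
        intro y hy
        have := hg c List.mem_cons_self y hy
        simp [this, hc]
      have hfront : ∀ z ∈ cs'.flatMap g, (fun (a b : String × Int) => decide (b.2 < a.2)) p z = true := by
        intro z hz
        rcases List.mem_flatMap.mp hz with ⟨c', hc', hzc'⟩
        have hz2 : z.2 = c' := hg c' (List.mem_cons_of_mem _ hc') z hzc'
        have hlt : c' < c := hcl c' hc'
        simp [hz2]; omega
      rw [List.flatMap_cons, pv_insertBy_append _ _ _ _ hpass,
        pv_insertBy_front _ _ _ hfront, List.flatMap_cons, if_pos hc]
      have hrest : cs'.flatMap (fun c' => if c' = p.2 then g c' ++ [p] else g c') = cs'.flatMap g := by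
        apply List.flatMap_congr
        intro c' hc'
        have : c' < c := hcl c' hc'
        rw [if_neg (by omega)]
      rw [hrest]
      simp
    · have hp' : p.2 ∈ cs' := by
        rcases List.mem_cons.mp hp with h | h
        · exact absurd h.symm hc
        · exact h
      have hpc : p.2 < c := hcl _ hp'
      have hpass : ∀ y ∈ g c, (fun (a b : String × Int) => decide (b.2 < a.2)) p y = false := by
        intro y hy
        have := hg c List.mem_cons_self y hy
        simp [this]; omega
      rw [List.flatMap_cons, pv_insertBy_append _ _ _ _ hpass,
        ih (fun c' h' => hg c' (List.mem_cons_of_mem _ h')) hs' hp']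
      rw [List.flatMap_cons, if_neg hc]

-- The stable reverse sort by snd of a list with values in [1, M] is the descending bucket concatenation.
theorem pv_sorted_groups (items : List (String × Int)) (M : Int)
    (h : ∀ q ∈ items, 1 ≤ q.2 ∧ q.2 ≤ M) :
    PySem.List.sorted items (fun x => x.2) true
      = ((PySem.List.pyRange 1 (M + 1) 1).reverse).flatMap
          (fun c => items.filter (fun q => q.2 == c)) := by
  induction items using List.reverseRecOn with
  | nil => simp [PySem.List.sorted_rev_eq_foldl_insertBy]
  | append_singleton t p ih =>
    have ht : ∀ q ∈ t, 1 ≤ q.2 ∧ q.2 ≤ M := fun q hq => h q (List.mem_append_left _ hq)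
    have hp := h p (List.mem_append_right _ List.mem_cons_self)
    rw [PySem.List.sorted_rev_eq_foldl_insertBy, List.foldl_append, ← PySem.List.sorted_rev_eq_foldl_insertBy]
    simp only [List.foldl_cons, List.foldl_nil]
    rw [ih ht]
    rw [pv_insertBy_groups _ _ _
      (fun c _ q hq => by simpa using (List.of_mem_filter hq))
      (by
        have := PySem.List.pairwise_lt_pyRange_one 1 (M + 1)
        simpa using List.pairwise_reverse.mpr (by exact this.imp (fun h => h)))
      (by
        rw [List.mem_reverse, PySem.List.mem_pyRange_one]
        omega)]
    apply List.flatMap_congr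
    intro c _
    rw [List.filter_append]
    by_cases hc : c = p.2
    · rw [if_pos hc]
      simp [List.filter, hc]
    · rw [if_neg hc]
      have : ((p.2 : Int) == c) = false := by simp; omega
      simp [List.filter, this]

-- filtering on a predicate of the bucket index pulls out of flatMap as a filter on the index list
theorem pv_flatMap_ite {α : Type} (cs : List Int) (P : Int → Prop) [DecidablePred P]
    (g : Int → List α) :
    cs.flatMap (fun c => if P c then g c else []) = (cs.filter (fun c => decide (P c))).flatMap g := by
  induction cs with
  | nil => rfl
  | cons c t ih =>
    by_cases hc : P c
    · simp [List.flatMap_cons, hc, ih]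
    · simp [List.flatMap_cons, hc, ih]

-- a range filtered to m ≤ · drops its head below max a m
theorem pv_filter_pyRange (a b m : Int) :
    (PySem.List.pyRange a b 1).filter (fun c => decide (m ≤ c)) = PySem.List.pyRange (max a m) b 1 := by
  by_cases hab : a < b
  · rw [PySem.List.pyRange_one_cons hab]
    by_cases hm : m ≤ a
    · rw [List.filter_cons]
      simp only [decide_eq_true_eq, hm, if_pos]
      rw [pv_filter_pyRange (a + 1) b m]
      have h1 : max (a + 1) m = a + 1 := by omega
      have h2 : max a m = a := by omega
      rw [h1, h2, ← PySem.List.pyRange_one_cons hab]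
    · rw [List.filter_cons]
      simp only [decide_eq_true_eq, hm, if_false]
      rw [pv_filter_pyRange (a + 1) b m]
      have : max (a + 1) m = max a m := by omega
      rw [this]
  · rw [PySem.List.pyRange_one_eq_nil (by omega)]
    rw [PySem.List.pyRange_one_eq_nil (by omega)]
    rfl
termination_by (b - a).toNat
decreasing_by all_goals (simp_wf; omega)

-- 'ordered = g c ++ ordered' over a list is flatMap over the reversed list
theorem pv_foldl_prepend {α : Type} (l : List Int) (g : Int → List α) (init : List α) :
    l.foldl (fun acc c => g c ++ acc) init = l.reverse.flatMap g ++ init := by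
  induction l generalizing init with
  | nil => simp
  | cons c t ih => simp [List.foldl_cons, ih, List.flatMap_append]

-- ===== VERDICT (by name: the statement is the Claim_ definition above) =====
theorem build_vocab_and_sentences_spec : Claim_equal_build_vocab_and_sentences := by
  intro ss mv mwc _
  unfold Spec_build_vocab_and_sentences build_vocab_and_sentences build_vocab_and_sentences_alt
  -- the interleaved first loop of A is (ss, counter of the concatenated words)
  rw [PySem.List.foldl_prod_mk
    (f := fun (s : List (List String × List Int)) p => s ++ [p])
    (g := fun (d : PySem.Dict String Int) (p : List String × List Int) =>
      p.1.foldl (fun d w => d.modify w 0 (· + 1)) d),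
    PySem.List.foldl_append_singleton_eq_self, pv_nested_count,
    ← PySem.Dict.counter_eq_foldl]
  simp only [List.nil_append]
  refine Prod.ext rfl (Prod.ext rfl ?_)
  -- now the vocab lists
  set W := ss.flatMap (fun p => p.1) with hW
  set items := (PySem.Dict.counter W).items with hitems
  set M := ((PySem.List.max? (PySem.Dict.counter W).values (fun v => v)).getD 0) with hM
  have hval : ∀ q ∈ items, 1 ≤ q.2 ∧ q.2 ≤ M := by
    intro q hq
    have hq2v : q.2 ∈ (PySem.Dict.counter W).values := by
      simp only [PySem.Dict.values]
      exact List.mem_map.mpr ⟨q, hq, rfl⟩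
    constructor
    · rw [hitems, PySem.Dict.items_counter] at hq
      rcases List.mem_map.mp hq with ⟨k, hk, hkq⟩
      have hkW : k ∈ W := (PySem.Set.mem_ofList _ _).mp hk
      have : 0 < W.count k := List.count_pos_iff.mpr hkW
      rw [← hkq]
      simpa using this
    · cases hmx : PySem.List.max? (PySem.Dict.counter W).values (fun v => v) with
      | none =>
        rw [PySem.List.max?_eq_none_iff] at hmx
        rw [hmx] at hq2v
        cases hq2v
      | some m =>
        have := PySem.List.max?_isMax hmx q.2 hq2v
        rw [hM, hmx]
        simpa using this
  have hbuck : ∀ c : Int,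
      (items.foldl (fun (d : PySem.Dict Int (List String)) p => d.modify p.2 [] (· ++ [p.1]))
        PySem.Dict.empty).getD c []
      = (items.filter (fun q => q.2 == c)).map (fun q => q.1) := by
    intro c
    have hswap : items.foldl (fun (d : PySem.Dict Int (List String)) p => d.modify p.2 [] (· ++ [p.1]))
        PySem.Dict.empty
        = (items.map (fun p => (p.2, p.1))).foldl
            (fun (d : PySem.Dict Int (List String)) p => d.modify p.1 [] (· ++ [p.2]))
            PySem.Dict.empty := by
      rw [List.foldl_map]
    rw [hswap, PySem.Dict.getD_foldl_modify_append]
    rw [List.filter_map]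
    simp [Function.comp_def]
  -- A's filtered sorted list, as buckets over the descending range
  have hA : ((PySem.List.sorted items (fun x => x.2) true).filter
        (fun x => decide (mwc ≤ x.2))).map (fun x => x.1)
      = ((PySem.List.pyRange (max mwc 1) (M + 1) 1).reverse).flatMap
          (fun c => (items.filter (fun q => q.2 == c)).map (fun q => q.1)) := by
    rw [pv_sorted_groups items M hval, List.filter_flatMap]
    have hstep : ((PySem.List.pyRange 1 (M + 1) 1).reverse).flatMap
        (fun c => (items.filter (fun q => q.2 == c)).filter (fun x => decide (mwc ≤ x.2)))
        = ((PySem.List.pyRange 1 (M + 1) 1).reverse).flatMap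
        (fun c => if mwc ≤ c then items.filter (fun q => q.2 == c) else []) := by
      apply List.flatMap_congr
      intro c _
      by_cases hc : mwc ≤ c
      · rw [if_pos hc]
        apply List.filter_eq_self.mpr
        intro q hq
        have : q.2 = c := by simpa using (List.of_mem_filter hq)
        simp [this, hc]
      · rw [if_neg hc]
        apply List.filter_eq_nil_iff.mpr
        intro q hq
        have : q.2 = c := by simpa using (List.of_mem_filter hq)
        simp [this]; omega
    rw [hstep, pv_flatMap_ite, List.filter_reverse, pv_filter_pyRange,
      max_comm 1 mwc, List.map_flatMap]
  rw [hA, pv_foldl_prepend, List.append_nil]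
  dsimp only
  refine congrArg (fun l => PySem.Set.ofList (PySem.List.slice l none (some mv))) ?_
  apply List.flatMap_congr
  intro c _
  exact (hbuck c).symm
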